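-- pv_equiv track=rewrite | github.com/Satyam-10124/Ginie_Daml | backend/agents/fix_agent.py | _fix_ensure_error_sync
-- ===== SOURCE A (Python) =====
-- def _fix_ensure_error_sync(code: str) -> str:
--     """Merge multiple ensure clauses into one."""
--     lines = code.split("\n")
--     result = []
--     ensure_conditions = []
--     ensure_indent = ""
--     in_where = False
--
--     for line in lines:
--         stripped = line.lstrip()
--         if stripped.startswith("where"):
--             in_where = True
--             if ensure_conditions:
--                 # Flush previous
--                 merged = " && ".join(ensure_conditions)
--                 result.append(f"{ensure_indent}ensure {merged}")
--                 ensure_conditions = []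
--             result.append(line)
--             continue
--
--         if in_where and stripped.startswith("ensure "):
--             ensure_indent = line[:len(line) - len(stripped)]
--             cond = stripped[len("ensure "):].strip()
--             ensure_conditions.append(cond)
--             continue
--
--         if ensure_conditions:
--             merged = " && ".join(ensure_conditions)
--             result.append(f"{ensure_indent}ensure {merged}")
--             ensure_conditions = []
--
--         if stripped.startswith("template "):
--             in_where = False
--
--         result.append(line)
--
--     if ensure_conditions:
--         merged = " && ".join(ensure_conditions)
--         result.append(f"{ensure_indent}ensure {merged}")
--
--     return "\n".join(result)
-- ===== SOURCE B (Python) =====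
-- def _fix_ensure_error_sync(code: str) -> str:
--     """Merge multiple ensure clauses into one (run-detection rewrite)."""
--     lines = code.split("\n")
--     out = []
--     in_where = False
--     i = 0
--     n = len(lines)
--     while i < n:
--         line = lines[i]
--         stripped = line.lstrip()
--         if in_where and stripped.startswith("ensure "):
--             # consume the whole consecutive run of ensure lines locally
--             conds = []
--             indent = ""
--             while i < n:
--                 l2 = lines[i]
--                 s2 = l2.lstrip()
--                 if not s2.startswith("ensure "):
--                     break
--                 indent = l2[:len(l2) - len(s2)]
--                 conds.append(s2[len("ensure "):].strip())
--                 i += 1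
--             out.append(indent + "ensure " + " && ".join(conds))
--             continue
--         if stripped.startswith("where"):
--             in_where = True
--         elif stripped.startswith("template "):
--             in_where = False
--         out.append(line)
--         i += 1
--     return "\n".join(out)
-- ===== Notes on version B (the rewrite author's own statement) =====
-- stated objective: alternative
-- what changed: Replaces A's cross-iteration accumulator-and-flush state machine with an indexed scan that detects each consecutive run of ensure lines locally via an inner loop and emits the merged line immediately, so no pending-conditions state crosses iterations.
import Mathlib
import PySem

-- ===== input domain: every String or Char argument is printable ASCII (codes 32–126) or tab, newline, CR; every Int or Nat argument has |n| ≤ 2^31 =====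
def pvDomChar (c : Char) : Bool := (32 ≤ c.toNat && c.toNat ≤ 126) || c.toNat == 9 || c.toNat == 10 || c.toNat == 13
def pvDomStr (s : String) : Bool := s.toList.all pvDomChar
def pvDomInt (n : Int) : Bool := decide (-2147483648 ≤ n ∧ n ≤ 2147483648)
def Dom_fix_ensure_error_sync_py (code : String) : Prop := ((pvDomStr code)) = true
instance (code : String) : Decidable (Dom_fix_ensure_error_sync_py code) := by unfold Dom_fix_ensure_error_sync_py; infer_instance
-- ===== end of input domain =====

-- B replaces A's cross-iteration accumulator-and-flush state machine with local run detection
-- (an inner loop consuming each consecutive run of ensure lines); objective: alternative decomposition, same cost.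

-- ===== PORT A =====
-- A's flush: 'if ensure_conditions: result.append(f"{ensure_indent}ensure {merged}")'
def pvFlushA (res : List (List Char)) (conds : List (List Char)) (indent : List Char) :
    List (List Char) :=
  if conds.isEmpty then res
  else res ++ [indent ++ "ensure ".toList ++ PySem.Chars.join " && ".toList conds]

-- one iteration of A's 'for line in lines' over state (result, ensure_conditions, ensure_indent, in_where)
def pvStepA (st : List (List Char) × List (List Char) × List Char × Bool) (line : List Char) :
    List (List Char) × List (List Char) × List Char × Bool :=
  let res := st.1
  let conds := st.2.1
  let indent := st.2.2.1
  let inW := st.2.2.2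
  let s := PySem.Chars.lstrip line
  if PySem.Chars.startswith s "where".toList then
    (pvFlushA res conds indent ++ [line], [], indent, true)
  else if inW && PySem.Chars.startswith s "ensure ".toList then
    (res, conds ++ [PySem.Chars.strip (PySem.List.slice s (some 7) none)],
     PySem.List.slice line none (some ((line.length : Int) - (s.length : Int))), true)
  else
    (pvFlushA res conds indent ++ [line], [],
     indent, if PySem.Chars.startswith s "template ".toList then false else inW)

def fix_ensure_error_sync_py (code : String) : String :=
  let lines := PySem.Chars.splitOn code.toList "\n".toList
  let st := lines.foldl pvStepA ([], [], [], false)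
  String.mk (PySem.Chars.join "\n".toList (pvFlushA st.1 st.2.1 st.2.2.1))

-- ===== PORT B =====
-- B's inner while loop: consume the consecutive run of ensure lines, returning
-- (collected conditions, indent of the last ensure line, remaining lines).
def pvRunB : List (List Char) → List (List Char) → List Char →
    List (List Char) × List Char × List (List Char)
  | [], conds, indent => (conds, indent, [])
  | l :: rest, conds, indent =>
    let s := PySem.Chars.lstrip l
    if PySem.Chars.startswith s "ensure ".toList then
      pvRunB rest (conds ++ [PySem.Chars.strip (PySem.List.slice s (some 7) none)])
        (PySem.List.slice l none (some ((l.length : Int) - (s.length : Int))))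
    else (conds, indent, l :: rest)

-- termination measure for B's outer loop (the inner loop never returns more lines than it got)
theorem pvRunB_length : ∀ (ls conds : List (List Char)) (indent : List Char),
    (pvRunB ls conds indent).2.2.length ≤ ls.length := by
  intro ls
  induction ls with
  | nil => intro conds indent; simp [pvRunB]
  | cons l rest ih =>
    intro conds indent
    simp only [pvRunB]
    split
    · exact le_trans (ih _ _) (Nat.le_succ _)
    · simp

-- B's outer 'while i < n' scan
def pvLoopB : List (List Char) → Bool → List (List Char)
  | [], _ => []
  | l :: rest, inW =>
    let s := PySem.Chars.lstrip l
    if h : inW && PySem.Chars.startswith s "ensure ".toList then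
      let r := pvRunB (l :: rest) [] []
      (r.2.1 ++ "ensure ".toList ++ PySem.Chars.join " && ".toList r.1) :: pvLoopB r.2.2 inW
    else if PySem.Chars.startswith s "where".toList then
      l :: pvLoopB rest true
    else if PySem.Chars.startswith s "template ".toList then
      l :: pvLoopB rest false
    else
      l :: pvLoopB rest inW
termination_by ls _ => ls.length
decreasing_by
  · have h2 : PySem.Chars.startswith (PySem.Chars.lstrip l) "ensure ".toList = true :=
      (Bool.and_eq_true _ _ |>.mp h).2
    simp only [pvRunB, h2, if_true]
    exact Nat.lt_succ_of_le (pvRunB_length _ _ _)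
  · simp
  · simp
  · simp

def fix_ensure_error_sync_py_alt (code : String) : String :=
  let lines := PySem.Chars.splitOn code.toList "\n".toList
  String.mk (PySem.Chars.join "\n".toList (pvLoopB lines false))

-- ===== PRECONDITION & SPEC =====
def Spec_fix_ensure_error_sync_py (code : String) (out : String) : Prop := out = fix_ensure_error_sync_py_alt code
instance (code : String) (out : String) : Decidable (Spec_fix_ensure_error_sync_py code out) := by unfold Spec_fix_ensure_error_sync_py; infer_instance

-- ===== CLAIM (what is proved, stated in full; the proofs are below) =====
def Claim_equal_fix_ensure_error_sync_py : Prop := ∀ (code : String), Dom_fix_ensure_error_sync_py code → Spec_fix_ensure_error_sync_py code (fix_ensure_error_sync_py code)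

-- ===== LEMMAS AND PROOFS =====

theorem pvEnsure_not_where (s : List Char)
    (h : PySem.Chars.startswith s "ensure ".toList = true) :
    PySem.Chars.startswith s "where".toList = false := by
  rw [PySem.Chars.startswith_iff] at h
  obtain ⟨t, rfl⟩ := h
  rw [Bool.eq_false_iff, Ne, PySem.Chars.startswith_iff]
  simp [List.cons_prefix_cons]

theorem pvRunB_conds_ne_nil (ls : List (List Char)) :
    ∀ (conds : List (List Char)) (indent : List Char), conds ≠ [] →
      (pvRunB ls conds indent).1 ≠ [] := by
  induction ls with
  | nil => intro conds indent h; simpa [pvRunB] using h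
  | cons l rest ih =>
    intro conds indent h
    simp only [pvRunB]
    split
    · exact ih _ _ (by simp)
    · simpa using h

theorem pvRunB_stop (ls : List (List Char)) :
    ∀ (conds : List (List Char)) (indent : List Char),
      (pvRunB ls conds indent).2.2 = [] ∨
      ∃ l' t, (pvRunB ls conds indent).2.2 = l' :: t ∧
        PySem.Chars.startswith (PySem.Chars.lstrip l') "ensure ".toList = false := by
  induction ls with
  | nil => intro conds indent; left; simp [pvRunB]
  | cons l rest ih =>
    intro conds indent
    simp only [pvRunB]
    split
    · exact ih _ _
    · next hne => right; exact ⟨l, rest, rfl, Bool.eq_false_iff.mpr hne⟩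

-- A's fold, started in the where-block with pending conditions, first traverses exactly
-- the run that pvRunB consumes, accumulating the same conditions and indent.
theorem pvFoldA_run (ls : List (List Char)) :
    ∀ (res conds : List (List Char)) (indent : List Char),
      List.foldl pvStepA (res, conds, indent, true) ls =
      List.foldl pvStepA (res, (pvRunB ls conds indent).1,
        (pvRunB ls conds indent).2.1, true) (pvRunB ls conds indent).2.2 := by
  induction ls with
  | nil => intro res conds indent; simp [pvRunB]
  | cons l rest ih =>
    intro res conds indent
    simp only [pvRunB]
    by_cases he : PySem.Chars.startswith (PySem.Chars.lstrip l) "ensure ".toList = true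
    · rw [if_pos he]
      have hw := pvEnsure_not_where _ he
      have hstep : pvStepA (res, conds, indent, true) l =
          (res, conds ++ [PySem.Chars.strip (PySem.List.slice (PySem.Chars.lstrip l) (some 7) none)],
           PySem.List.slice l none (some ((l.length : Int) - ((PySem.Chars.lstrip l).length : Int))), true) := by
        simp only [pvStepA]
        simp only [hw, he]
        simp
      rw [List.foldl_cons, hstep, ih]
    · rw [if_neg he]

-- once a non-ensure line follows, flushing the pending conditions first commutes with the step
theorem pvStepA_flush (res conds : List (List Char)) (indent : List Char) (l : List Char)
    (hc : conds ≠ [])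
    (he : PySem.Chars.startswith (PySem.Chars.lstrip l) "ensure ".toList = false) :
    pvStepA (res, conds, indent, true) l =
    pvStepA (res ++ [indent ++ "ensure ".toList ++ PySem.Chars.join " && ".toList conds],
      [], indent, true) l := by
  have hc' : conds.isEmpty = false := by simpa using hc
  by_cases hw : PySem.Chars.startswith (PySem.Chars.lstrip l) "where".toList = true
  · simp only [pvStepA]
    simp only [hw]
    simp [pvFlushA, hc']
  · have hw' : PySem.Chars.startswith (PySem.Chars.lstrip l) "where".toList = false :=
      Bool.eq_false_iff.mpr hw
    simp only [pvStepA]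
    simp only [hw', he]
    simp [pvFlushA, hc']

def pvFin (st : List (List Char) × List (List Char) × List Char × Bool) : List (List Char) :=
  pvFlushA st.1 st.2.1 st.2.2.1

theorem pvMain : ∀ (n : Nat) (ls : List (List Char)), ls.length ≤ n →
    ∀ (res : List (List Char)) (indent : List Char) (inW : Bool),
      pvFin (List.foldl pvStepA (res, [], indent, inW) ls) = res ++ pvLoopB ls inW := by
  intro n
  induction n with
  | zero =>
    intro ls hls res indent inW
    have : ls = [] := List.length_eq_zero_iff.mp (Nat.le_zero.mp hls)
    subst this
    simp [pvLoopB, pvFin, pvFlushA]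
  | succ n ih =>
    intro ls hls res indent inW
    cases ls with
    | nil => simp [pvLoopB, pvFin, pvFlushA]
    | cons l rest =>
      have hrest : rest.length ≤ n := by simpa using hls
      by_cases hrun : (inW && PySem.Chars.startswith (PySem.Chars.lstrip l) "ensure ".toList) = true
      · -- run case
        obtain ⟨hW, he⟩ := Bool.and_eq_true _ _ |>.mp hrun
        subst hW
        have hw := pvEnsure_not_where _ he
        have hstep : pvStepA (res, [], indent, true) l =
            (res, [PySem.Chars.strip (PySem.List.slice (PySem.Chars.lstrip l) (some 7) none)],
             PySem.List.slice l none (some ((l.length : Int) - ((PySem.Chars.lstrip l).length : Int))), true) := by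
          simp only [pvStepA]
          simp only [hw, he]
          simp
        set c0 := PySem.Chars.strip (PySem.List.slice (PySem.Chars.lstrip l) (some 7) none) with hc0
        set i0 := PySem.List.slice l none (some ((l.length : Int) - ((PySem.Chars.lstrip l).length : Int))) with hi0
        have hrB : pvRunB (l :: rest) [] [] = pvRunB rest [c0] i0 := by
          simp only [pvRunB, he, if_true]; rfl
        set r := pvRunB rest [c0] i0 with hr
        have hconds : r.1 ≠ [] := pvRunB_conds_ne_nil rest [c0] i0 (by simp)
        have hcondsE : r.1.isEmpty = false := by simpa using hconds
        have hfold : List.foldl pvStepA (res, [], indent, true) (l :: rest) =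
            List.foldl pvStepA (res, r.1, r.2.1, true) r.2.2 := by
          rw [List.foldl_cons, hstep, pvFoldA_run]
        have hloop : pvLoopB (l :: rest) true =
            (r.2.1 ++ "ensure ".toList ++ PySem.Chars.join " && ".toList r.1) ::
              pvLoopB r.2.2 true := by
          rw [pvLoopB]
          simp only [he, Bool.and_self, dite_true, hrB]
        have hrlen : r.2.2.length ≤ rest.length := by
          rw [hr]; exact pvRunB_length rest [c0] i0
        rcases pvRunB_stop rest [c0] i0 with hstopnil | ⟨l', t, hsplit, hne⟩
        · rw [← hr] at hstopnil
          rw [hfold, hstopnil, hloop, hstopnil]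
          simp [pvFin, pvFlushA, hcondsE, pvLoopB]
        · rw [← hr] at hsplit
          have htlen : r.2.2.length ≤ n := le_trans hrlen hrest
          rw [hfold, hsplit, List.foldl_cons,
            pvStepA_flush res r.1 r.2.1 l' hconds hne, ← List.foldl_cons, ← hsplit,
            ih r.2.2 htlen _ r.2.1 true, hloop]
          simp
      · -- single-line case: the three non-run branches agree step for step
        have hstep1 : List.foldl pvStepA (res, [], indent, inW) (l :: rest) =
            List.foldl pvStepA (pvStepA (res, [], indent, inW) l) rest := rfl
        by_cases hw : PySem.Chars.startswith (PySem.Chars.lstrip l) "where".toList = true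
        · have hstep : pvStepA (res, [], indent, inW) l = (res ++ [l], [], indent, true) := by
            simp only [pvStepA]
            rw [hw]
            simp [pvFlushA]
          rw [hstep1, hstep, ih rest hrest (res ++ [l]) indent true]
          rw [pvLoopB]
          simp only [hrun, hw, if_true]
          simp
        · have hw' : PySem.Chars.startswith (PySem.Chars.lstrip l) "where".toList = false :=
            Bool.eq_false_iff.mpr hw
          by_cases ht : PySem.Chars.startswith (PySem.Chars.lstrip l) "template ".toList = true
          · have hstep : pvStepA (res, [], indent, inW) l = (res ++ [l], [], indent, false) := by
              have hrun' : (inW && PySem.Chars.startswith (PySem.Chars.lstrip l) "ensure ".toList) = false :=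
                Bool.eq_false_iff.mpr hrun
              simp only [pvStepA]
              rw [hw', hrun', ht]
              simp [pvFlushA]
            rw [hstep1, hstep, ih rest hrest (res ++ [l]) indent false]
            rw [pvLoopB]
            simp only [hrun, dite_false, hw', Bool.false_eq_true, if_false, ht, if_true]
            simp
          · have ht' : PySem.Chars.startswith (PySem.Chars.lstrip l) "template ".toList = false :=
              Bool.eq_false_iff.mpr ht
            have hstep : pvStepA (res, [], indent, inW) l = (res ++ [l], [], indent, inW) := by
              have hrun' : (inW && PySem.Chars.startswith (PySem.Chars.lstrip l) "ensure ".toList) = false :=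
                Bool.eq_false_iff.mpr hrun
              simp only [pvStepA]
              rw [hw', hrun', ht']
              simp [pvFlushA]
            rw [hstep1, hstep, ih rest hrest (res ++ [l]) indent inW]
            rw [pvLoopB]
            simp only [hrun, dite_false, hw', Bool.false_eq_true, if_false, ht', if_false]
            simp

-- ===== VERDICT (by name: the statement is the Claim_ definition above) =====
theorem fix_ensure_error_sync_py_spec : Claim_equal_fix_ensure_error_sync_py := by
  unfold Claim_equal_fix_ensure_error_sync_py
  intro code _
  unfold Spec_fix_ensure_error_sync_py fix_ensure_error_sync_py fix_ensure_error_sync_py_alt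
  have := pvMain (PySem.Chars.splitOn code.toList "\n".toList).length
      (PySem.Chars.splitOn code.toList "\n".toList) le_rfl [] [] false
  simp only [pvFin] at this
  dsimp only
  rw [this]
  simp
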